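-- pv_equiv track=rewrite | github.com/pypi-data/pypi-mirror-255 | packages/caddiepy/caddiepy-0.3.0.tar.gz/caddiepy-0.3.0/caddiepy/utils/statistics.py | contingency_table
-- ===== SOURCE A (Python) =====
-- def contingency_table(pred, test, cutoff=10):
--     # calculates contingency table comparing a list of predictions "pred" to list of expected elements "test"
--     # lists need to be of same length and contain the same elements
--     # cut lists based of cutoff
--     test_cutoff = test[:cutoff]
--     tp = 0
--     fp = 0
--     tn = 0
--     fn = 0
--     for i, x in enumerate(pred):
--         if i < cutoff:
--             if x in test_cutoff:
--                 tp += 1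
--             else:
--                 fp += 1
--         else:  # i > cutoff
--             if x in test_cutoff:
--                 fn += 1
--             else:
--                 tn += 1
--     return [[tp, fp], [fn, tn]]
-- ===== SOURCE B (Python) =====
-- def contingency_table(pred, test, cutoff=10):
--     # Frequency-table formulation: instead of testing each prediction against
--     # the reference slice one by one, build a frequency dict of each segment of
--     # pred once and sum the multiplicities of the distinct values that occur in
--     # the reference set; misses are derived by subtraction from segment lengths.
--     seen = set(test[:cutoff])
--     k = max(cutoff, 0)
--     head, tail = pred[:k], pred[k:]
--
--     def hits(seg):
--         freq = {}
--         for x in seg: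
--             freq[x] = freq.get(x, 0) + 1
--         return sum(c for v, c in freq.items() if v in seen)
--
--     tp = hits(head)
--     fn = hits(tail)
--     return [[tp, len(head) - tp], [fn, len(tail) - fn]]
-- ===== Notes on version B (the rewrite author's own statement) =====
-- stated objective: faster
-- what changed: Replaces the single enumerate loop with four incremented counters by a set of the reference slice plus a frequency dict per pred segment: hits are summed over the distinct values of the segment, and fp/tn are derived by subtraction from segment lengths.
import Mathlib
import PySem

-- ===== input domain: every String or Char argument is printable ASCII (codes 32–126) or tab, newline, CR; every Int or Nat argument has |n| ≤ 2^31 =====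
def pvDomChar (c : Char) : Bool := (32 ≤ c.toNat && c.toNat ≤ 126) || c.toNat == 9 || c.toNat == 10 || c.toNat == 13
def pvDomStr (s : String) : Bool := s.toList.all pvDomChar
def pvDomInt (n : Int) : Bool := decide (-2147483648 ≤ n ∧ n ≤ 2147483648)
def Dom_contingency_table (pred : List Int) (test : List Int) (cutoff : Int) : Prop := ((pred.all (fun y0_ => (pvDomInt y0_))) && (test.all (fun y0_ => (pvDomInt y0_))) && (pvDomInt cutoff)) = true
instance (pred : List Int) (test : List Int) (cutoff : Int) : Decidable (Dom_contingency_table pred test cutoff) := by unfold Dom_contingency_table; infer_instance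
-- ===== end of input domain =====

-- B replaces the four-counter enumerate loop by a set of the reference slice plus a
-- frequency dict per pred segment (hits summed over distinct values, misses by subtraction).

-- ===== PORT A =====
-- the loop body of A ('if i < cutoff: … else: …'), state = (tp, fp, tn, fn)
def ctStep (tc : List Int) (cutoff : Int) (s : Int × Int × Int × Int) (ix : Int × Int) : Int × Int × Int × Int :=
  if ix.1 < cutoff then
    if ix.2 ∈ tc then (s.1 + 1, s.2.1, s.2.2.1, s.2.2.2)
    else (s.1, s.2.1 + 1, s.2.2.1, s.2.2.2)
  else
    if ix.2 ∈ tc then (s.1, s.2.1, s.2.2.1, s.2.2.2 + 1)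
    else (s.1, s.2.1, s.2.2.1 + 1, s.2.2.2)

def contingency_table (pred : List Int) (test : List Int) (cutoff : Int) : List (List Int) :=
  let test_cutoff := PySem.List.slice test none (some cutoff)
  let r := (PySem.List.enumerate pred 0).foldl (ctStep test_cutoff cutoff) (0, 0, 0, 0)
  [[r.1, r.2.1], [r.2.2.2, r.2.2.1]]

-- ===== PORT B =====
-- Source B's helper 'hits': build a frequency dict of the segment, then sum the
-- multiplicities of the distinct values that occur in the reference set
def ctHits (seen : PySem.Set Int) (seg : List Int) : Int :=
  let freq := seg.foldl (fun d x => d.insert x (d.getD x 0 + 1)) PySem.Dict.empty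
  ((freq.items.filter (fun vc => PySem.Set.contains seen vc.1)).map (fun vc => vc.2)).sum

def contingency_table_alt (pred : List Int) (test : List Int) (cutoff : Int) : List (List Int) :=
  let seen := PySem.Set.ofList (PySem.List.slice test none (some cutoff))
  let k := max cutoff 0
  let head := PySem.List.slice pred none (some k)
  let tail := PySem.List.slice pred (some k) none
  let tp := ctHits seen head
  let fn := ctHits seen tail
  [[tp, (head.length : Int) - tp], [fn, (tail.length : Int) - fn]]

-- ===== PRECONDITION & SPEC =====
def Spec_contingency_table (pred : List Int) (test : List Int) (cutoff : Int) (out : List (List Int)) : Prop := out = contingency_table_alt pred test cutoff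
instance (pred : List Int) (test : List Int) (cutoff : Int) (out : List (List Int)) : Decidable (Spec_contingency_table pred test cutoff out) := by unfold Spec_contingency_table; infer_instance

-- ===== CLAIM (what is proved, stated in full; the proofs are below) =====
def Claim_equal_contingency_table : Prop := ∀ (pred : List Int) (test : List Int) (cutoff : Int), Dom_contingency_table pred test cutoff → Spec_contingency_table pred test cutoff (contingency_table pred test cutoff)

-- ===== LEMMAS AND PROOFS =====

-- invariant of A's loop: from start index i, the fold adds the head/tail hit and miss counts
lemma ctStep_fold (tc : List Int) (cutoff : Int) (pred : List Int) :
    ∀ (i tp fp tn fn : Int), 0 ≤ i →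
    (PySem.List.enumerate pred i).foldl (ctStep tc cutoff) (tp, fp, tn, fn) =
      (tp + ((pred.take (cutoff - i).toNat).countP (fun x => decide (x ∈ tc)) : Int),
       fp + (((pred.take (cutoff - i).toNat).length : Int) - ((pred.take (cutoff - i).toNat).countP (fun x => decide (x ∈ tc)) : Int)),
       tn + (((pred.drop (cutoff - i).toNat).length : Int) - ((pred.drop (cutoff - i).toNat).countP (fun x => decide (x ∈ tc)) : Int)),
       fn + ((pred.drop (cutoff - i).toNat).countP (fun x => decide (x ∈ tc)) : Int)) := by
  induction pred with
  | nil => intro i tp fp tn fn hi; simp [PySem.List.enumerate]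
  | cons x xs ih =>
    intro i tp fp tn fn hi
    rw [PySem.List.enumerate_cons, List.foldl_cons]
    by_cases hlt : i < cutoff
    · have hm : (cutoff - i).toNat = (cutoff - (i + 1)).toNat + 1 := by omega
      rw [hm]
      simp only [List.take_succ_cons, List.drop_succ_cons]
      by_cases hmem : x ∈ tc
      · simp only [ctStep, if_pos hlt, if_pos hmem]
        rw [ih (i + 1) _ _ _ _ (by omega)]
        simp only [List.countP_cons, hmem]
        simp
        omega
      · simp only [ctStep, if_pos hlt, if_neg hmem]
        rw [ih (i + 1) _ _ _ _ (by omega)]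
        simp only [List.countP_cons, hmem]
        simp
        omega
    · have hm : (cutoff - i).toNat = 0 := by omega
      have hm' : (cutoff - (i + 1)).toNat = 0 := by omega
      rw [hm]
      simp only [List.take_zero, List.drop_zero]
      by_cases hmem : x ∈ tc
      · simp only [ctStep, if_neg hlt, if_pos hmem]
        rw [ih (i + 1) _ _ _ _ (by omega), hm']
        simp only [List.take_zero, List.drop_zero, List.countP_cons, hmem]
        simp
        omega
      · simp only [ctStep, if_neg hlt, if_neg hmem]
        rw [ih (i + 1) _ _ _ _ (by omega), hm']
        simp only [List.take_zero, List.drop_zero, List.countP_cons, hmem]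
        simp
        omega

-- B's hits helper counts exactly the segment elements lying in tc
lemma ctHits_eq_countP (tc seg : List Int) :
    ctHits (PySem.Set.ofList tc) seg = (seg.countP (fun x => decide (x ∈ tc)) : Int) := by
  unfold ctHits
  simp only [PySem.Dict.foldl_insert_getD_add_one_eq_counter, PySem.Dict.items_counter,
      List.filter_map, List.map_map]
  have hperm : (PySem.Set.ofList seg).Perm seg.dedup := by
    rw [List.perm_ext_iff_of_nodup (PySem.Set.nodup_ofList seg) seg.nodup_dedup]
    intro a
    rw [PySem.Set.mem_ofList, List.mem_dedup]
  have hpred : ∀ k : Int,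
      ((fun vc : Int × Int => PySem.Set.contains (PySem.Set.ofList tc) vc.1) ∘
        fun k : Int => (k, (seg.count k : Int))) k = decide (k ∈ tc) := by
    intro k
    simp [PySem.Set.mem_ofList]
  rw [List.filter_congr (fun k _ => hpred k)]
  calc (((PySem.Set.ofList seg).filter (fun k => decide (k ∈ tc))).map
          ((fun vc : Int × Int => vc.2) ∘ fun k : Int => (k, (seg.count k : Int)))).sum
      = ((seg.dedup.filter (fun k => decide (k ∈ tc))).map
          (fun k : Int => (seg.count k : Int))).sum := by
        exact ((hperm.filter _).map _).sum_eq
    _ = (((seg.dedup.filter (fun k => decide (k ∈ tc))).map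
          (fun k : Int => seg.count k)).sum : Int) := by
        rw [Nat.cast_list_sum, List.map_map]; rfl
    _ = (seg.countP (fun x => decide (x ∈ tc)) : Int) := by
        rw [List.sum_map_count_dedup_filter_eq_countP]

-- ===== VERDICT (by name: the statement is the Claim_ definition above) =====
theorem contingency_table_spec : Claim_equal_contingency_table := by
  intro pred test cutoff _
  unfold Spec_contingency_table
  simp only [contingency_table, contingency_table_alt]
  rw [ctStep_fold _ cutoff pred 0 0 0 0 0 (le_refl 0)]
  rw [ctHits_eq_countP, ctHits_eq_countP]
  have hk : (0 : Int) ≤ max cutoff 0 := le_max_right _ _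
  rw [PySem.List.slice_to (xs := pred) hk, PySem.List.slice_from (xs := pred) hk]
  have hkn : (max cutoff 0).toNat = (cutoff - 0).toNat := by omega
  rw [hkn]
  simp
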